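-- pv_equiv track=rewrite | github.com/khygu0919/codefight | Intro/digitDegree.py | digitDegree
-- ===== SOURCE A (Python) =====
-- def digitDegree(n):
-- 	a=str(n)
-- 	b=[]
-- 	c=0
-- 	if len(a)==1:
-- 		return 0
-- 	else:
-- 		for i in a:
-- 			b.append(str(i))
-- 	while len(a)>1:
-- 		d=0
-- 		for j in b:
-- 			d+=int(j)
-- 		a=str(d)
-- 		b=[]
-- 		for k in a:
-- 			b.append(k)
-- 		c+=1
-- 	return c
-- ===== SOURCE B (Python) =====
-- def digitDegree(n):
--     s = str(n)
--     if len(s) == 1: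
--         return 0
--     return 1 + digitDegree(sum(int(ch) for ch in s))
-- ===== Notes on version B (the rewrite author's own statement) =====
-- stated objective: simpler
-- what changed: A's explicit while-loop with a counter, a rebuilt character list and manual digit-sum accumulation is replaced by a three-line direct recursion on the digit-sum recurrence, bottoming out when the decimal string is a single character.
-- outside the precondition, e.g. on digitDegree(-5): A raises ValueError, B raises ValueError
import Mathlib
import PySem

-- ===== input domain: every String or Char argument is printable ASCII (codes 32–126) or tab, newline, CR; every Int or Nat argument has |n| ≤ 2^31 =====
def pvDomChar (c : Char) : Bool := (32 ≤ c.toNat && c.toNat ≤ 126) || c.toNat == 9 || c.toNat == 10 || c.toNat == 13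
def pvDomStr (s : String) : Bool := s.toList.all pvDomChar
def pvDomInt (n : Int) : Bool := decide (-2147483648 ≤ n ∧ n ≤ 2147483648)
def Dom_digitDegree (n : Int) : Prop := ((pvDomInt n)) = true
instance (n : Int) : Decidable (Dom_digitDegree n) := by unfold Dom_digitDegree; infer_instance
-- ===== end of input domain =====

-- B replaces A's while-loop-with-counter and rebuilt char lists by a direct three-line recursion on the digit-sum recurrence (objective: simpler).


-- ===== PORT A =====
-- the while loop: state (a as char list, b as list of 1-char strings, counter c); fuel only makes it total
def pvLoopA (fuel : Nat) (a : List Char) (b : List String) (c : Int) : Int :=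
  if a.length > 1 then
    match fuel with
    | 0 => c
    | fuel + 1 =>
      let d := b.foldl (fun d j => d + (PySem.Int.ofStr? j).getD 0) 0
      let a' := (PySem.Int.toStr d).toList
      pvLoopA fuel a' (a'.map (fun k => String.ofList [k])) (c + 1)
  else c

def digitDegree (n : Int) : Int :=
  let a := (PySem.Int.toStr n).toList
  if a.length == 1 then 0
  else
    let b := a.map (fun i => String.ofList [i])   -- b.append(str(i))
    pvLoopA (n.toNat + 1) a b 0

-- ===== PORT B =====
def pvRecB (fuel : Nat) (n : Int) : Int :=
  let s := (PySem.Int.toStr n).toList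
  if s.length == 1 then 0
  else
    match fuel with
    | 0 => 0
    | fuel + 1 =>
      1 + pvRecB fuel (s.foldl (fun acc ch => acc + (PySem.Int.ofStr? (String.ofList [ch])).getD 0) 0)

def digitDegree_alt (n : Int) : Int := pvRecB (n.toNat + 1) n

-- ===== PRECONDITION & SPEC =====
-- Pre_ excludes negative n, on which Python A raises ValueError (int('-') on the sign character).
def Pre_digitDegree (n : Int) : Prop := 0 ≤ n
instance (n : Int) : Decidable (Pre_digitDegree n) := by unfold Pre_digitDegree; infer_instance
def pvWitness_digitDegree : Int := 199
def Spec_digitDegree (n : Int) (out : Int) : Prop := out = digitDegree_alt n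
instance (n : Int) (out : Int) : Decidable (Spec_digitDegree n out) := by unfold Spec_digitDegree; infer_instance

-- ===== CLAIM (what is proved, stated in full; the proofs are below) =====
def Claim_equal_digitDegree : Prop := ∀ (n : Int), Dom_digitDegree n → Pre_digitDegree n → Spec_digitDegree n (digitDegree n)

-- ===== LEMMAS AND PROOFS =====
-- str(n) is never empty
theorem pvToDigitsCore_cons_ne (b : Nat) : ∀ (f n : Nat) (c : Char) (l : List Char), Nat.toDigitsCore b f n (c :: l) ≠ [] := by
  intro f
  induction f with
  | zero => intro n c l; simp [Nat.toDigitsCore]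
  | succ f ih =>
    intro n c l
    simp only [Nat.toDigitsCore]
    split
    · simp
    · exact ih _ _ _

theorem pvToDigits_ne_nil (n : Nat) : Nat.toDigits 10 n ≠ [] := by
  show Nat.toDigitsCore 10 (n+1) n [] ≠ []
  simp only [Nat.toDigitsCore]
  by_cases h : n / 10 = 0
  · simp [h]
  · simp only [h, if_false]
    exact pvToDigitsCore_cons_ne 10 _ _ _ _

theorem pvToChars_ne_nil (m : Int) : PySem.Int.toChars m ≠ [] := by
  unfold PySem.Int.toChars
  split
  · simp
  · exact pvToDigits_ne_nil _

theorem pvToChars_len_pos (m : Int) : 1 ≤ (PySem.Int.toChars m).length := by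
  have := pvToChars_ne_nil m
  cases h : (PySem.Int.toChars m) with
  | nil => exact absurd h this
  | cons a l => simp

-- the loop of A, started on the digits of m, computes c + B's recursion on m (same fuel)
theorem pvLoopA_eq_recB : ∀ (fuel : Nat) (m c : Int),
    pvLoopA fuel (PySem.Int.toChars m) ((PySem.Int.toChars m).map (fun k => String.ofList [k])) c
      = c + pvRecB fuel m := by
  intro fuel
  induction fuel with
  | zero =>
    intro m c
    unfold pvLoopA pvRecB
    simp only [PySem.Int.toList_toStr]
    by_cases h : 1 < (PySem.Int.toChars m).length
    · have h1 : ¬ (PySem.Int.toChars m).length = 1 := by omega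
      simp [h1]
    · have h1 : (PySem.Int.toChars m).length = 1 := by
        have := pvToChars_len_pos m; omega
      simp [h1]
  | succ fuel ih =>
    intro m c
    unfold pvLoopA pvRecB
    simp only [PySem.Int.toList_toStr]
    by_cases h : 1 < (PySem.Int.toChars m).length
    · have h1 : ¬ (PySem.Int.toChars m).length = 1 := by omega
      simp only [h, if_true, h1, beq_iff_eq, if_false]
      rw [List.foldl_map]
      rw [ih]
      ring
    · have h1 : (PySem.Int.toChars m).length = 1 := by
        have := pvToChars_len_pos m; omega
      simp [h1]

-- ===== VERDICT (by name: the statement is the Claim_ definition above) =====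
theorem digitDegree_spec : Claim_equal_digitDegree := by
  intro n _ _
  unfold Spec_digitDegree digitDegree digitDegree_alt
  simp only [PySem.Int.toList_toStr]
  by_cases h : (PySem.Int.toChars n).length = 1
  · unfold pvRecB
    simp [PySem.Int.toList_toStr, h]
  · simp only [h, beq_iff_eq, if_false]
    have := pvLoopA_eq_recB (n.toNat + 1) n 0
    simpa using this
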